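-- pv_equiv track=rewrite | github.com/dimitreortt/Iniciacao-Cientifica---Biologia-Computacional | 5 Algoritmos para Intervalos Comuns Máximo/drivers/GenomeDecrypter/CollectGeneMatchings.py | collectAllGeneMatchings
-- ===== SOURCE A (Python) =====
-- import copy
--
-- def collectAllGeneMatchings(lista1, lista2):
-- 	#print 'Executing CollectAllGeneMatchings...'
--
-- 	if lista1 == [] or lista2 == []:
-- 		return [[]]
--
-- 	listaAll = []
-- 	#travasPossiveis lista todas as travas possiveis para o primeiro elemento
-- 	#da lista1
-- 	travasPossiveis = [(lista1[0], item) for item in lista2]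
-- 	for item in travasPossiveis:
--
-- 		l1,l2 = copy.deepcopy(lista1), copy.deepcopy(lista2)
-- 		l1.remove(item[0])
-- 		l2.remove(item[1])
--
-- 		listaHere = collectAllGeneMatchings(l1, l2)
-- 		for lista in listaHere:
-- 			lista.insert(0, item)
-- 		listaAll.extend(listaHere)
--
-- 	return listaAll
-- ===== SOURCE B (Python) =====
-- def collectAllGeneMatchings(lista1, lista2):
--     # iterative worklist: states are (partial matching, remaining lista2 values)
--     states = [([], list(lista2))]
--     for e in lista1:
--         new = []
--         for partial, rem in states:
--             if not rem:
--                 new.append((partial, rem))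
--             else:
--                 for v in rem:
--                     j = rem.index(v)
--                     new.append((partial + [(e, v)], rem[:j] + rem[j + 1:]))
--         states = new
--     return [partial for partial, _ in states]
-- ===== Notes on version B (the rewrite author's own statement) =====
-- stated objective: alternative
-- what changed: Replaces A's deepcopy-and-recurse enumeration with an iterative worklist that folds over lista1, maintaining (partial matching, remaining lista2) states and expanding each state over the remaining values in order.
import Mathlib
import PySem

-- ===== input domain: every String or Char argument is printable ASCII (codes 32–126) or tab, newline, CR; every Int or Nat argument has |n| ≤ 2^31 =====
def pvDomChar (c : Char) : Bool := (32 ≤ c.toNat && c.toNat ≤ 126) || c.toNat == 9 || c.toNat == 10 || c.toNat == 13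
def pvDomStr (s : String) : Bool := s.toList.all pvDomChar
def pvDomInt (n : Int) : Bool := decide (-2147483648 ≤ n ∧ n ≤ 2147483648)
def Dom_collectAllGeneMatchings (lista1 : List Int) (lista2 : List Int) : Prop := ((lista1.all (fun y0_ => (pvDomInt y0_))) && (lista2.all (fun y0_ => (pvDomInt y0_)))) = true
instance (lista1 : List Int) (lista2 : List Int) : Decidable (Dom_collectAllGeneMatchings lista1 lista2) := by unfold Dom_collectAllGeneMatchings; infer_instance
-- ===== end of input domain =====

-- B replaces A's deepcopy-and-recurse enumeration with an iterative worklist fold over lista1 (alternative decomposition, same cost class).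

-- ===== PORT A =====
-- fuel = lista1.length is a pure totality guard: each recursive call shortens lista1 by one.
def cagmFuel : Nat → List Int → List Int → List (List (Int × Int))
  | 0, _, _ => [[]]
  | Nat.succ n, lista1, lista2 =>
    if lista1 = [] ∨ lista2 = [] then [[]]
    else
      let travasPossiveis := lista2.map (fun item => (lista1.headI, item))
      travasPossiveis.foldl (fun listaAll item =>
        let l1 := (PySem.List.remove? lista1 item.1).getD lista1
        let l2 := (PySem.List.remove? lista2 item.2).getD lista2
        let listaHere := cagmFuel n l1 l2
        listaAll ++ listaHere.map (fun lista => item :: lista)) []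

def collectAllGeneMatchings (lista1 : List Int) (lista2 : List Int) : List (List (Int × Int)) :=
  cagmFuel lista1.length lista1 lista2

-- ===== PORT B =====
-- j = rem.index(v); rem[:j] + rem[j+1:]  (v always present where B calls this)
def removeFirstSl (xs : List Int) (v : Int) : List Int :=
  match PySem.List.index? xs v with
  | some j => PySem.List.slice xs none (some (j : Int)) ++ PySem.List.slice xs (some ((j : Int) + 1)) none
  | none => []

def cagmStep (e : Int) (states : List (List (Int × Int) × List Int)) : List (List (Int × Int) × List Int) :=
  states.foldl (fun new s =>
    if s.2 = [] then new ++ [s]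
    else new ++ s.2.map (fun v => (s.1 ++ [(e, v)], removeFirstSl s.2 v))) []

def collectAllGeneMatchings_alt (lista1 : List Int) (lista2 : List Int) : List (List (Int × Int)) :=
  (lista1.foldl (fun states e => cagmStep e states) [([], lista2)]).map (fun s => s.1)

-- ===== PRECONDITION & SPEC =====
def Spec_collectAllGeneMatchings (lista1 : List Int) (lista2 : List Int) (out : List (List (Int × Int))) : Prop := out = collectAllGeneMatchings_alt lista1 lista2
instance (lista1 : List Int) (lista2 : List Int) (out : List (List (Int × Int))) : Decidable (Spec_collectAllGeneMatchings lista1 lista2 out) := by unfold Spec_collectAllGeneMatchings; infer_instance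

-- ===== CLAIM (what is proved, stated in full; the proofs are below) =====
def Claim_equal_collectAllGeneMatchings : Prop := ∀ (lista1 : List Int) (lista2 : List Int), Dom_collectAllGeneMatchings lista1 lista2 → Spec_collectAllGeneMatchings lista1 lista2 (collectAllGeneMatchings lista1 lista2)

-- ===== LEMMAS AND PROOFS =====

-- the per-state expansion performed by cagmStep
def cagmExpand (e : Int) (s : List (Int × Int) × List Int) : List (List (Int × Int) × List Int) :=
  if s.2 = [] then [s] else s.2.map (fun v => (s.1 ++ [(e, v)], removeFirstSl s.2 v))

theorem removeFirstSl_of_mem (xs : List Int) (v : Int) (h : v ∈ xs) :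
    removeFirstSl xs v = xs.erase v := by
  have hs : (PySem.List.index? xs v).isSome := (PySem.List.index?_isSome_iff xs v).2 h
  obtain ⟨j, hj⟩ := Option.isSome_iff_exists.1 hs
  obtain ⟨pre, suf, hxs, hlen, hnotin⟩ := (PySem.List.index?_eq_some_iff xs v j).1 hj
  subst hxs
  have h1 : PySem.List.slice (pre ++ v :: suf) none (some (j : Int)) = (pre ++ v :: suf).take j :=
    PySem.List.slice_to_natCast _ _
  have h2 : PySem.List.slice (pre ++ v :: suf) (some ((j : Int) + 1)) none = (pre ++ v :: suf).drop (j + 1) := by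
    have := PySem.List.slice_from_natCast (pre ++ v :: suf) (j + 1)
    push_cast at this
    exact this
  simp only [removeFirstSl, hj, h1, h2]
  rw [List.erase_append_right _ (by simpa using hnotin)]
  subst hlen
  simp [List.drop_append, List.erase_cons_head]

theorem cagmStep_eq_flatMap (e : Int) (states : List (List (Int × Int) × List Int)) :
    cagmStep e states = states.flatMap (cagmExpand e) := by
  unfold cagmStep
  suffices h : ∀ acc, states.foldl (fun new s =>
      if s.2 = [] then new ++ [s]
      else new ++ s.2.map (fun v => (s.1 ++ [(e, v)], removeFirstSl s.2 v))) acc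
      = acc ++ states.flatMap (cagmExpand e) by simpa using h []
  induction states with
  | nil => intro acc; simp
  | cons s rest ih =>
    intro acc
    simp only [List.foldl_cons, List.flatMap_cons, cagmExpand]
    by_cases hs : s.2 = [] <;> simp [hs, ih, List.append_assoc]

theorem foldl_step_flatMap (l1 : List Int) (states : List (List (Int × Int) × List Int)) :
    l1.foldl (fun st e => cagmStep e st) states
      = states.flatMap (fun s => l1.foldl (fun st e => cagmStep e st) [s]) := by
  induction l1 generalizing states with
  | nil => simp
  | cons e l1 ih =>
    simp only [List.foldl_cons]
    rw [ih (cagmStep e states), cagmStep_eq_flatMap, List.flatMap_assoc]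
    refine List.flatMap_congr ?_
    intro x hx
    rw [ih (cagmStep e [x]), cagmStep_eq_flatMap]
    simp

theorem cagmFuel_nil_right (fuel : Nat) (l1 : List Int) : cagmFuel fuel l1 [] = [[]] := by
  cases fuel <;> simp [cagmFuel]

theorem cagmFuel_cons (n : Nat) (e : Int) (l1 rem : List Int) (hrem : rem ≠ []) :
    cagmFuel (n + 1) (e :: l1) rem
      = rem.flatMap (fun v => (cagmFuel n l1 (rem.erase v)).map (fun lista => ((e : Int), v) :: lista)) := by
  show cagmFuel (Nat.succ n) (e :: l1) rem = _
  simp only [cagmFuel]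
  rw [if_neg (by simp [hrem]), PySem.List.foldl_append_eq_flatMap, List.flatMap_map]
  refine (List.nil_append _) ▸ List.flatMap_congr ?_
  intro v hv
  rw [List.headI_cons, PySem.List.remove?_cons_self, PySem.List.remove?_eq_some_erase rem v hv]
  simp

theorem cagm_main (l1 : List Int) : ∀ (fuel : Nat) (rem : List Int) (p : List (Int × Int)),
    l1.length ≤ fuel →
    ((l1.foldl (fun st e => cagmStep e st) [(p, rem)]).map (fun s => s.1))
      = (cagmFuel fuel l1 rem).map (fun m => p ++ m) := by
  induction l1 with
  | nil =>
    intro fuel rem p _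
    cases fuel <;> simp [cagmFuel]
  | cons e l1 ih =>
    intro fuel rem p h
    cases fuel with
    | zero => simp at h
    | succ n =>
      have hn : l1.length ≤ n := by simpa using h
      simp only [List.foldl_cons]
      rw [show cagmStep e [(p, rem)] = cagmExpand e (p, rem) by
        rw [cagmStep_eq_flatMap]; simp]
      by_cases hrem : rem = []
      · subst hrem
        rw [show cagmExpand e (p, []) = [(p, [])] by simp [cagmExpand]]
        rw [ih n [] p hn, cagmFuel_nil_right, cagmFuel_nil_right]
      · simp only [cagmExpand, if_neg hrem]
        rw [foldl_step_flatMap, List.flatMap_map, List.map_flatMap,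
            cagmFuel_cons n e l1 rem hrem, List.map_flatMap]
        refine List.flatMap_congr ?_
        intro v hv
        rw [ih n (removeFirstSl rem v) (p ++ [(e, v)]) hn, removeFirstSl_of_mem rem v hv]
        simp

-- ===== VERDICT (by name: the statement is the Claim_ definition above) =====
theorem collectAllGeneMatchings_spec : Claim_equal_collectAllGeneMatchings := by
  intro lista1 lista2 _
  unfold Spec_collectAllGeneMatchings collectAllGeneMatchings collectAllGeneMatchings_alt
  rw [cagm_main lista1 lista1.length lista2 [] le_rfl]
  simp
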